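-- pv_equiv track=rewrite | github.com/CliDyn/cmip6_gpt | src/utils/cmip6_utils.py | dict_to_query_string
-- ===== SOURCE A (Python) =====
-- def dict_to_query_string(data):
--     """
--     Convert a nested dictionary into a specific query string format.
--
--     Args:
--         data (dict): A nested dictionary with model names as keys and attribute dictionaries as values
--
--     Returns:
--         str: A formatted query string
--     """
--     # Initialize collections for each attribute
--     attributes = {
--         'activity_id': set(),
--         'institution_id': set(),
--         'source_id': set(),
--         'experiment_id': set(),
--         'member_id': set(),
--         'table_id': set(),
--         'variable_id': set(),
--         'grid_label': set()
--     }
--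
--     # Extract source_id (model names) from the top level keys
--     attributes['source_id'] = set(data.keys())
--
--     # Extract other attributes from each model's data
--     for model_name, model_data in data.items():
--         for attr, values in model_data.items():
--             if attr in attributes:
--                 # Add all keys from the values dictionary
--                 attributes[attr].update(values.keys())
--
--     # For member_id, table_id, and variable_id, we assume they should be single values
--     # based on your example output (using the most common one or first one)
--
--     # Check if all models have the same member_id
--     member_ids = set()
--     for model_data in data.values():
--         if 'member_id' in model_data:
--             member_ids.update(model_data['member_id'].keys())
--     # If there's only one member_id across all models, use it as a string
--     if len(member_ids) == 1:
--         attributes['member_id'] = member_ids.pop()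
--
--     # Same for table_id
--     table_ids = set()
--     for model_data in data.values():
--         if 'table_id' in model_data:
--             table_ids.update(model_data['table_id'].keys())
--     if len(table_ids) == 1:
--         attributes['table_id'] = table_ids.pop()
--
--     # Same for variable_id
--     variable_ids = set()
--     for model_data in data.values():
--         if 'variable_id' in model_data:
--             variable_ids.update(model_data['variable_id'].keys())
--     if len(variable_ids) == 1:
--         attributes['variable_id'] = variable_ids.pop()
--
--     # Format the output string
--     parts = []
--     for attr, values in attributes.items():
--         if isinstance(values, set):
--             values_list = sorted(list(values))
--             if len(values_list) == 1:
--                 parts.append(f"{attr} == '{values_list[0]}'")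
--             else:
--                 formatted_values = "', '".join(values_list)
--                 parts.append(f"{attr} == ['{formatted_values}']")
--         else:
--             # For single string values (member_id, table_id, etc.)
--             parts.append(f"{attr} == '{values}'")
--
--     # Join with " & " separator
--     return " & ".join(parts)
-- ===== SOURCE B (Python) =====
-- ATTRS = ('activity_id', 'institution_id', 'source_id', 'experiment_id',
--          'member_id', 'table_id', 'variable_id', 'grid_label')
--
--
-- def _collect(data, attr):
--     """Attribute-major: gather this attribute's values by one scan of the data."""
--     vals = set()
--     if attr == 'source_id':
--         vals.update(data)
--     for model_data in data.values():
--         if attr in model_data: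
--             vals.update(model_data[attr])
--     return vals
--
--
-- def _format(attr, vals):
--     vs = sorted(vals)
--     if len(vs) == 1:
--         return f"{attr} == '{vs[0]}'"
--     return f"{attr} == ['" + "', '".join(vs) + "']"
--
--
-- def dict_to_query_string(data):
--     return " & ".join(_format(a, _collect(data, a)) for a in ATTRS)
-- ===== Notes on version B (the rewrite author's own statement) =====
-- stated objective: alternative
-- what changed: B traverses attribute-major instead of data-major: for each of the eight attribute names it gathers that attribute's values by one keyed scan of the data and formats immediately, eliminating A's dict-of-sets accumulator, its item-by-item inner loop, the three member/table/variable rescans and the len==1 set-to-string collapse (a no-op for the output).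
import Mathlib
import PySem

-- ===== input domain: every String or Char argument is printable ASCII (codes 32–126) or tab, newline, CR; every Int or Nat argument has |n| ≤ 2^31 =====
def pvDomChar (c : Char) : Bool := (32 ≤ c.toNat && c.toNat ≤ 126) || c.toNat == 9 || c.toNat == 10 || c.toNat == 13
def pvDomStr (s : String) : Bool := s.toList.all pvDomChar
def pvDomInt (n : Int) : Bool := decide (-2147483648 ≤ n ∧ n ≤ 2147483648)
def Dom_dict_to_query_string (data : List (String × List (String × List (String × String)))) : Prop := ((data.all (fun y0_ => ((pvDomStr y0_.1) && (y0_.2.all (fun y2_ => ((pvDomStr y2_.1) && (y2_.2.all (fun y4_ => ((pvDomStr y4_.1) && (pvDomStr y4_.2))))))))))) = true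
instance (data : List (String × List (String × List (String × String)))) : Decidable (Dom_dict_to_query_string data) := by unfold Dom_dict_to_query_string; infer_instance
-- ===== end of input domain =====

-- B is attribute-major: for each of the eight attribute names it collects that attribute's value
-- set by one scan of the data (keyed lookup per model) and formats it directly, with no dict of
-- sets, no data-major accumulation pass and no len==1 set-to-string collapse; objective: alternative.


-- ===== PORT A =====
def dict_to_query_string (data : List (String × List (String × List (String × String)))) : String :=
  -- attributes = { 'activity_id': set(), … }
  let attributes : PySem.Dict String (PySem.Set String ⊕ String) :=
    PySem.Dict.ofList [("activity_id", Sum.inl PySem.Set.empty), ("institution_id", Sum.inl PySem.Set.empty),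
      ("source_id", Sum.inl PySem.Set.empty), ("experiment_id", Sum.inl PySem.Set.empty),
      ("member_id", Sum.inl PySem.Set.empty), ("table_id", Sum.inl PySem.Set.empty),
      ("variable_id", Sum.inl PySem.Set.empty), ("grid_label", Sum.inl PySem.Set.empty)]
  -- attributes['source_id'] = set(data.keys())
  let attributes := attributes.insert "source_id" (Sum.inl (PySem.Set.ofList (data.map Prod.fst)))
  -- for model_name, model_data in data.items(): for attr, values in model_data.items(): …
  let attributes := data.foldl (fun attrs md =>
      md.2.foldl (fun attrs av =>
        if attrs.contains av.1 then
          -- attributes[attr].update(values.keys()); the stored value is always a set at this point,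
          -- so the inr branch (where Python would raise AttributeError) is unreachable
          attrs.modify av.1 (Sum.inl PySem.Set.empty) (fun v =>
            match v with
            | Sum.inl s => Sum.inl (PySem.Set.update s (av.2.map Prod.fst))
            | Sum.inr t => Sum.inr t)
        else attrs) attrs) attributes
  -- member_ids = set(); for model_data in data.values(): if 'member_id' in model_data: …
  let member_ids : PySem.Set String := data.foldl (fun s md =>
      if (PySem.Dict.mk md.2).contains "member_id" then
        PySem.Set.update s ((((PySem.Dict.mk md.2).get? "member_id").getD []).map Prod.fst)
      else s) PySem.Set.empty
  -- if len(member_ids) == 1: attributes['member_id'] = member_ids.pop()  (pop on a 1-element set = its element)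
  let attributes := if PySem.Set.len member_ids = 1 then
      attributes.insert "member_id" (Sum.inr (member_ids.headD "")) else attributes
  let table_ids : PySem.Set String := data.foldl (fun s md =>
      if (PySem.Dict.mk md.2).contains "table_id" then
        PySem.Set.update s ((((PySem.Dict.mk md.2).get? "table_id").getD []).map Prod.fst)
      else s) PySem.Set.empty
  let attributes := if PySem.Set.len table_ids = 1 then
      attributes.insert "table_id" (Sum.inr (table_ids.headD "")) else attributes
  let variable_ids : PySem.Set String := data.foldl (fun s md =>
      if (PySem.Dict.mk md.2).contains "variable_id" then
        PySem.Set.update s ((((PySem.Dict.mk md.2).get? "variable_id").getD []).map Prod.fst)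
      else s) PySem.Set.empty
  let attributes := if PySem.Set.len variable_ids = 1 then
      attributes.insert "variable_id" (Sum.inr (variable_ids.headD "")) else attributes
  -- parts = []; for attr, values in attributes.items(): …
  let parts : List String := attributes.items.foldl (fun parts kv =>
      match kv.2 with
      | Sum.inl values =>
        let values_list := PySem.List.sorted values (fun x => x) false
        if values_list.length = 1 then
          parts ++ [kv.1 ++ " == '" ++ ((PySem.List.pyGet? values_list 0).getD "") ++ "'"]
        else
          parts ++ [kv.1 ++ " == ['" ++ PySem.Str.join "', '" values_list ++ "']"]
      | Sum.inr v => parts ++ [kv.1 ++ " == '" ++ v ++ "'"]) []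
  PySem.Str.join " & " parts

-- ===== PORT B =====
-- ATTRS
def pvAttrs : List String :=
  ["activity_id", "institution_id", "source_id", "experiment_id",
   "member_id", "table_id", "variable_id", "grid_label"]

-- _collect(data, attr): one scan of the data for this attribute
def pvCollect (data : List (String × List (String × List (String × String))))
    (attr : String) : PySem.Set String :=
  -- vals = set()
  let vals : PySem.Set String := PySem.Set.empty
  -- if attr == 'source_id': vals.update(data)
  let vals := if attr = "source_id" then PySem.Set.update vals (data.map Prod.fst) else vals
  -- for model_data in data.values(): if attr in model_data: vals.update(model_data[attr])
  data.foldl (fun vals md =>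
    if (PySem.Dict.mk md.2).contains attr then
      PySem.Set.update vals ((((PySem.Dict.mk md.2).get? attr).getD []).map Prod.fst)
    else vals) vals

-- _format(attr, vals)
def pvFormat (attr : String) (vals : PySem.Set String) : String :=
  let vs := PySem.List.sorted vals (fun x => x) false
  if vs.length = 1 then
    attr ++ " == '" ++ ((PySem.List.pyGet? vs 0).getD "") ++ "'"
  else
    attr ++ " == ['" ++ PySem.Str.join "', '" vs ++ "']"

def dict_to_query_string_alt (data : List (String × List (String × List (String × String)))) : String :=
  PySem.Str.join " & " (pvAttrs.map (fun a => pvFormat a (pvCollect data a)))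

-- ===== PRECONDITION & SPEC =====
-- Pre_ excludes association lists in which some model's attribute dict has duplicate keys: such an input
-- does not represent any Python dict (dict keys are unique), so no input A actually runs on is excluded.
def Pre_dict_to_query_string (data : List (String × List (String × List (String × String)))) : Prop :=
  ∀ p ∈ data, (p.2.map Prod.fst).Nodup
instance (data : List (String × List (String × List (String × String)))) : Decidable (Pre_dict_to_query_string data) := by unfold Pre_dict_to_query_string; infer_instance

def pvWitness_dict_to_query_string : (List (String × List (String × List (String × String)))) :=
  [("CanESM5", [("member_id", [("r1i1p1f1", "1")]), ("table_id", [("Amon", "1"), ("day", "2")])])]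

def Spec_dict_to_query_string (data : List (String × List (String × List (String × String)))) (out : String) : Prop := out = dict_to_query_string_alt data
instance (data : List (String × List (String × List (String × String)))) (out : String) : Decidable (Spec_dict_to_query_string data out) := by unfold Spec_dict_to_query_string; infer_instance

-- ===== CLAIM (what is proved, stated in full; the proofs are below) =====
def Claim_equal_dict_to_query_string : Prop := ∀ (data : List (String × List (String × List (String × String)))), Dom_dict_to_query_string data → Pre_dict_to_query_string data → Spec_dict_to_query_string data (dict_to_query_string data)

-- ===== LEMMAS AND PROOFS =====

-- the per-slot effect of one (attr, values) step on a value of A's mixed-type dict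
def pvUpdA (v : PySem.Set String ⊕ String) (l : List String) : PySem.Set String ⊕ String :=
  match v with
  | Sum.inl s => Sum.inl (PySem.Set.update s l)
  | Sum.inr t => Sum.inr t

-- the set collected for one attribute over the whole data, starting from s
def pvCollectG {ν : Type} (upd : ν → List String → ν) (k : String)
    (data : List (String × List (String × List (String × String)))) (v : ν) : ν :=
  data.foldl (fun v md => md.2.foldl (fun v av =>
    if av.1 = k then upd v (av.2.map Prod.fst) else v) v) v

-- the main collection loop of A's port, generalized over the value type
def pvLoop {ν : Type} (dflt : ν) (upd : ν → List String → ν)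
    (data : List (String × List (String × List (String × String))))
    (d : PySem.Dict String ν) : PySem.Dict String ν :=
  data.foldl (fun d md =>
    md.2.foldl (fun d av =>
      if d.contains av.1 then
        d.modify av.1 dflt (fun v => upd v (av.2.map Prod.fst))
      else d) d) d

theorem pvInner_keys {ν : Type} (dflt : ν) (upd : ν → List String → ν)
    (md : List (String × List (String × String))) (d : PySem.Dict String ν) :
    (md.foldl (fun d av =>
      if d.contains av.1 then
        d.modify av.1 dflt (fun v => upd v (av.2.map Prod.fst))
      else d) d).keys = d.keys := by
  induction md generalizing d with
  | nil => rfl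
  | cons av rest ih =>
    simp only [List.foldl_cons]
    by_cases h : d.contains av.1 = true
    · rw [if_pos h, ih, PySem.Dict.keys_modify, PySem.Dict.keys_insert_of_contains _ _ h]
    · rw [if_neg h, ih]

theorem pvLoop_keys {ν : Type} (dflt : ν) (upd : ν → List String → ν)
    (data : List (String × List (String × List (String × String))))
    (d : PySem.Dict String ν) : (pvLoop dflt upd data d).keys = d.keys := by
  induction data generalizing d with
  | nil => rfl
  | cons md rest ih =>
    simp only [pvLoop, List.foldl_cons] at *
    rw [ih, pvInner_keys]

theorem pvInner_getD {ν : Type} (dflt : ν) (upd : ν → List String → ν) (k : String)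
    (md : List (String × List (String × String))) (d : PySem.Dict String ν)
    (hk : d.contains k = true) :
    (md.foldl (fun d av =>
      if d.contains av.1 then
        d.modify av.1 dflt (fun v => upd v (av.2.map Prod.fst))
      else d) d).getD k dflt
    = md.foldl (fun v av => if av.1 = k then upd v (av.2.map Prod.fst) else v) (d.getD k dflt) := by
  induction md generalizing d with
  | nil => rfl
  | cons av rest ih =>
    simp only [List.foldl_cons]
    by_cases ha : av.1 = k
    · subst ha
      rw [if_pos hk, if_pos rfl,
        ih _ (by rw [PySem.Dict.contains_modify]; simp),
        PySem.Dict.getD_modify_self]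
    · rw [if_neg ha]
      by_cases h : d.contains av.1 = true
      · rw [if_pos h, ih _ (by rw [PySem.Dict.contains_modify, hk]; simp),
          PySem.Dict.getD_modify_of_ne _ _ _ (fun he => ha he.symm)]
      · rw [if_neg h, ih _ hk]

theorem pvLoop_getD {ν : Type} (dflt : ν) (upd : ν → List String → ν) (k : String)
    (data : List (String × List (String × List (String × String))))
    (d : PySem.Dict String ν) (hk : d.contains k = true) :
    (pvLoop dflt upd data d).getD k dflt = pvCollectG upd k data (d.getD k dflt) := by
  induction data generalizing d with
  | nil => rfl
  | cons md rest ih =>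
    simp only [pvLoop, pvCollectG, List.foldl_cons] at *
    rw [ih _ (by
        rw [PySem.Dict.contains_eq_decide_mem_keys] at hk ⊢
        rw [pvInner_keys]; exact hk),
      pvInner_getD dflt upd k md.2 d hk]

theorem pvInner_lift (k : String) (md : List (String × List (String × String)))
    (s : PySem.Set String) :
    md.foldl (fun v av => if av.1 = k then pvUpdA v (av.2.map Prod.fst) else v) (Sum.inl s)
    = Sum.inl (md.foldl (fun v av =>
        if av.1 = k then PySem.Set.update v (av.2.map Prod.fst) else v) s) := by
  induction md generalizing s with
  | nil => rfl
  | cons av rest ih =>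
    simp only [List.foldl_cons]
    by_cases ha : av.1 = k
    · rw [if_pos ha, if_pos ha]; exact ih _
    · rw [if_neg ha, if_neg ha]; exact ih _

-- A's mixed-type collection is the inl-lift of the plain set collection
theorem pvCollectG_lift (k : String) (data : List (String × List (String × List (String × String))))
    (s : PySem.Set String) :
    pvCollectG pvUpdA k data (Sum.inl s) = Sum.inl (pvCollectG PySem.Set.update k data s) := by
  induction data generalizing s with
  | nil => rfl
  | cons md rest ih =>
    simp only [pvCollectG, List.foldl_cons] at *
    rw [pvInner_lift, ih]

theorem pvFold_id (k : String) (md : List (String × List (String × String)))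
    (h : ∀ av ∈ md, ¬ av.1 = k) (s : PySem.Set String) :
    md.foldl (fun s av => if av.1 = k then PySem.Set.update s (av.2.map Prod.fst) else s) s = s := by
  induction md generalizing s with
  | nil => rfl
  | cons av rest ih =>
    simp only [List.foldl_cons, if_neg (h av (List.mem_cons_self))]
    exact ih (fun p hp => h p (List.mem_cons_of_mem _ hp)) s

-- on one model's dict with unique keys, the first-match lookup equals the item loop
theorem pvModel (k : String) (md : List (String × List (String × String)))
    (hnd : (md.map Prod.fst).Nodup) (s : PySem.Set String) :
    (if (PySem.Dict.mk md).contains k then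
      PySem.Set.update s ((((PySem.Dict.mk md).get? k).getD []).map Prod.fst)
    else s)
    = md.foldl (fun s av =>
        if av.1 = k then PySem.Set.update s (av.2.map Prod.fst) else s) s := by
  induction md generalizing s with
  | nil => simp [PySem.Dict.contains_mk]
  | cons av rest ih =>
    simp only [List.map_cons, List.nodup_cons] at hnd
    obtain ⟨hout, hrest⟩ := hnd
    simp only [List.foldl_cons]
    by_cases ha : av.1 = k
    · rw [if_pos ha]
      have hc : (PySem.Dict.mk (av :: rest)).contains k = true := by
        rw [PySem.Dict.contains_mk]; simp [List.any_cons, ha]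
      have hg : (PySem.Dict.mk (av :: rest)).get? k = some av.2 := by
        obtain ⟨a, vs⟩ := av
        rw [PySem.Dict.get?_mk_cons, if_pos (by simpa using ha)]
      rw [if_pos hc, hg, pvFold_id k rest (fun p hp he =>
        hout (by rw [ha, ← he]; exact List.mem_map_of_mem hp)) _]
      rfl
    · have hc : (PySem.Dict.mk (av :: rest)).contains k = (PySem.Dict.mk rest).contains k := by
        rw [PySem.Dict.contains_mk, PySem.Dict.contains_mk, List.any_cons]
        simp [ha]
      have hg : (PySem.Dict.mk (av :: rest)).get? k = (PySem.Dict.mk rest).get? k := by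
        obtain ⟨a, vs⟩ := av
        rw [PySem.Dict.get?_mk_cons, if_neg (by simpa using ha)]
      rw [hc, hg, if_neg ha, ih hrest s]

-- a keyed scan of the data (first-match dict lookup per model) equals the item loop, given unique keys
theorem pvRescan_eq_collect (k : String) (data : List (String × List (String × List (String × String))))
    (hnd : ∀ p ∈ data, (p.2.map Prod.fst).Nodup) (s : PySem.Set String) :
    data.foldl (fun s md =>
      if (PySem.Dict.mk md.2).contains k then
        PySem.Set.update s ((((PySem.Dict.mk md.2).get? k).getD []).map Prod.fst)
      else s) s = pvCollectG PySem.Set.update k data s := by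
  induction data generalizing s with
  | nil => rfl
  | cons md rest ih =>
    simp only [pvCollectG, List.foldl_cons] at *
    rw [pvModel k md.2 (hnd md (List.mem_cons_self)) s,
      ih (fun p hp => hnd p (List.mem_cons_of_mem _ hp))]


-- ===== assembly: named pieces of port A (all definitionally equal to the port's let-chain) =====

def pvBase : PySem.Dict String (PySem.Set String ⊕ String) :=
  PySem.Dict.ofList [("activity_id", Sum.inl PySem.Set.empty), ("institution_id", Sum.inl PySem.Set.empty),
    ("source_id", Sum.inl PySem.Set.empty), ("experiment_id", Sum.inl PySem.Set.empty),
    ("member_id", Sum.inl PySem.Set.empty), ("table_id", Sum.inl PySem.Set.empty),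
    ("variable_id", Sum.inl PySem.Set.empty), ("grid_label", Sum.inl PySem.Set.empty)]

def pvInitA (data : List (String × List (String × List (String × String)))) :
    PySem.Dict String (PySem.Set String ⊕ String) :=
  pvBase.insert "source_id" (Sum.inl (PySem.Set.ofList (data.map Prod.fst)))

def pvRescan (k : String) (data : List (String × List (String × List (String × String)))) :
    PySem.Set String :=
  data.foldl (fun s md =>
    if (PySem.Dict.mk md.2).contains k then
      PySem.Set.update s ((((PySem.Dict.mk md.2).get? k).getD []).map Prod.fst)
    else s) PySem.Set.empty

theorem pvRescan_eq (k : String) (data : List (String × List (String × List (String × String))))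
    (hnd : ∀ p ∈ data, (p.2.map Prod.fst).Nodup) :
    pvRescan k data = pvCollectG PySem.Set.update k data PySem.Set.empty :=
  pvRescan_eq_collect k data hnd PySem.Set.empty

def pvFmtA (kv : String × (PySem.Set String ⊕ String)) : String :=
  match kv.2 with
  | Sum.inl values =>
    let values_list := PySem.List.sorted values (fun x => x) false
    if values_list.length = 1 then
      kv.1 ++ " == '" ++ ((PySem.List.pyGet? values_list 0).getD "") ++ "'"
    else
      kv.1 ++ " == ['" ++ PySem.Str.join "', '" values_list ++ "']"
  | Sum.inr v => kv.1 ++ " == '" ++ v ++ "'"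

def pvD1 (data : List (String × List (String × List (String × String)))) :
    PySem.Dict String (PySem.Set String ⊕ String) :=
  pvLoop (Sum.inl PySem.Set.empty) pvUpdA data (pvInitA data)

def pvCondIns (d : PySem.Dict String (PySem.Set String ⊕ String)) (k : String)
    (r : PySem.Set String) : PySem.Dict String (PySem.Set String ⊕ String) :=
  if PySem.Set.len r = 1 then d.insert k (Sum.inr (r.headD "")) else d

def pvFinalA (data : List (String × List (String × List (String × String)))) :
    PySem.Dict String (PySem.Set String ⊕ String) :=
  pvCondIns (pvCondIns (pvCondIns (pvD1 data) "member_id" (pvRescan "member_id" data))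
    "table_id" (pvRescan "table_id" data)) "variable_id" (pvRescan "variable_id" data)

theorem pvParts (items : List (String × (PySem.Set String ⊕ String))) :
    items.foldl (fun parts kv =>
      match kv.2 with
      | Sum.inl values =>
        let values_list := PySem.List.sorted values (fun x => x) false
        if values_list.length = 1 then
          parts ++ [kv.1 ++ " == '" ++ ((PySem.List.pyGet? values_list 0).getD "") ++ "'"]
        else
          parts ++ [kv.1 ++ " == ['" ++ PySem.Str.join "', '" values_list ++ "']"]
      | Sum.inr v => parts ++ [kv.1 ++ " == '" ++ v ++ "'"]) []
    = items.map pvFmtA := by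
  rw [PySem.List.foldl_congr_mem items _ (fun parts kv => parts ++ [pvFmtA kv]) []
    (by
      intro acc kv _
      rcases kv with ⟨a, v | v⟩
      · simp only [pvFmtA]
        split_ifs <;> rfl
      · rfl)]
  simpa using PySem.List.foldl_append_singleton_eq_map pvFmtA items []

theorem pvA_eq (data : List (String × List (String × List (String × String)))) :
    dict_to_query_string data = PySem.Str.join " & " ((pvFinalA data).items.map pvFmtA) := by
  rw [← pvParts]; rfl

-- ===== B side: the keyed per-attribute scan equals the generic collection =====

theorem pvCollect_eq_ne (data : List (String × List (String × List (String × String))))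
    (a : String) (h : ¬ a = "source_id")
    (hnd : ∀ p ∈ data, (p.2.map Prod.fst).Nodup) :
    pvCollect data a = pvCollectG PySem.Set.update a data PySem.Set.empty := by
  simp only [pvCollect, if_neg h]
  exact pvRescan_eq_collect a data hnd PySem.Set.empty

theorem pvCollect_eq_src (data : List (String × List (String × List (String × String))))
    (hnd : ∀ p ∈ data, (p.2.map Prod.fst).Nodup) :
    pvCollect data "source_id"
    = pvCollectG PySem.Set.update "source_id" data (PySem.Set.ofList (data.map Prod.fst)) := by
  simp only [pvCollect]
  have hs : PySem.Set.update (PySem.Set.empty : PySem.Set String) (data.map Prod.fst)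
      = PySem.Set.ofList (data.map Prod.fst) := rfl
  rw [hs]
  exact pvRescan_eq_collect "source_id" data hnd _

theorem pvB_eq (data : List (String × List (String × List (String × String)))) :
    dict_to_query_string_alt data
    = PySem.Str.join " & " (pvAttrs.map (fun a => pvFormat a (pvCollect data a))) := rfl

theorem pvInitA_keys (data : List (String × List (String × List (String × String)))) :
    (pvInitA data).keys = pvAttrs := by
  rw [pvInitA, PySem.Dict.keys_insert_of_contains _ _ (by decide)]; decide

theorem pvCondIns_keys (d : PySem.Dict String (PySem.Set String ⊕ String)) (k : String)
    (r : PySem.Set String) (h : d.keys = pvAttrs) (hk : k ∈ pvAttrs) :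
    (pvCondIns d k r).keys = pvAttrs := by
  unfold pvCondIns
  split_ifs
  · rw [PySem.Dict.keys_insert_of_contains _ _
      (by rw [PySem.Dict.contains_eq_decide_mem_keys, h]; simpa using hk)]
    exact h
  · exact h

theorem pvCondIns_getD_ne (d : PySem.Dict String (PySem.Set String ⊕ String)) (k a : String)
    (r : PySem.Set String) (d0 : PySem.Set String ⊕ String) (h : a ≠ k) :
    (pvCondIns d k r).getD a d0 = d.getD a d0 := by
  unfold pvCondIns
  split_ifs
  · rw [PySem.Dict.getD_insert_of_ne _ _ _ h]
  · rfl

theorem pvCondIns_getD_self (d : PySem.Dict String (PySem.Set String ⊕ String)) (k : String)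
    (r : PySem.Set String) (d0 : PySem.Set String ⊕ String) :
    (pvCondIns d k r).getD k d0
    = if PySem.Set.len r = 1 then Sum.inr (r.headD "") else d.getD k d0 := by
  unfold pvCondIns
  split_ifs
  · rw [PySem.Dict.getD_insert_self]
  · rfl

theorem pvFinalA_keys (data : List (String × List (String × List (String × String)))) :
    (pvFinalA data).keys = pvAttrs := by
  unfold pvFinalA pvD1
  have k1 := (pvLoop_keys (Sum.inl PySem.Set.empty) pvUpdA data (pvInitA data)).trans
    (pvInitA_keys data)
  have k2 := pvCondIns_keys _ "member_id" (pvRescan "member_id" data) k1 (by decide)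
  have k3 := pvCondIns_keys _ "table_id" (pvRescan "table_id" data) k2 (by decide)
  exact pvCondIns_keys _ "variable_id" (pvRescan "variable_id" data) k3 (by decide)

theorem pvInitA_contains (data : List (String × List (String × List (String × String))))
    (a : String) (h : (a == "source_id" || pvBase.contains a) = true) :
    (pvInitA data).contains a = true := by
  rw [pvInitA, PySem.Dict.contains_insert]; exact h

theorem pvInitA_getD_ne (data : List (String × List (String × List (String × String))))
    (a : String) (h : a ≠ "source_id") :
    (pvInitA data).getD a (Sum.inl PySem.Set.empty) = pvBase.getD a (Sum.inl PySem.Set.empty) := by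
  rw [pvInitA, PySem.Dict.getD_insert_of_ne _ _ _ h]

theorem pvInitA_getD_src (data : List (String × List (String × List (String × String)))) :
    (pvInitA data).getD "source_id" (Sum.inl PySem.Set.empty)
    = Sum.inl (PySem.Set.ofList (data.map Prod.fst)) := by
  rw [pvInitA, PySem.Dict.getD_insert_self]

theorem pvInitA_getD_plain (data : List (String × List (String × List (String × String))))
    (a : String) (h : a ≠ "source_id")
    (h2 : pvBase.getD a (Sum.inl PySem.Set.empty) = Sum.inl PySem.Set.empty) :
    (pvInitA data).getD a (Sum.inl PySem.Set.empty) = Sum.inl PySem.Set.empty :=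
  (pvInitA_getD_ne data a h).trans h2

theorem pvLoopA_getD (data : List (String × List (String × List (String × String))))
    (a : String) (s : PySem.Set String) (hc : (pvInitA data).contains a = true)
    (h0 : (pvInitA data).getD a (Sum.inl PySem.Set.empty) = Sum.inl s) :
    (pvLoop (Sum.inl PySem.Set.empty) pvUpdA data (pvInitA data)).getD a (Sum.inl PySem.Set.empty)
    = Sum.inl (pvCollectG PySem.Set.update a data s) := by
  rw [pvLoop_getD _ _ _ _ _ hc, h0, pvCollectG_lift]

theorem pvFmt_inl (a : String) (S : PySem.Set String) :
    pvFmtA (a, Sum.inl S) = pvFormat a S := rfl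

-- a one-element set formats identically whether collapsed to its element or kept as a set
theorem pvFmt_collapse (a : String) (S : PySem.Set String) (h : PySem.Set.len S = 1) :
    pvFmtA (a, Sum.inr (S.headD "")) = pvFormat a S := by
  have hl : S.length = 1 := by
    simp only [PySem.Set.len] at h
    exact_mod_cast h
  obtain ⟨x, rfl⟩ := List.length_eq_one_iff.mp hl
  rfl

-- one ordinary attribute: A's slot stays a set and equals B's collected set
theorem pvPlainCase (data : List (String × List (String × List (String × String))))
    (a : String) (s : PySem.Set String)
    (h1 : a ≠ "member_id") (h2 : a ≠ "table_id") (h3 : a ≠ "variable_id")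
    (hc : (pvInitA data).contains a = true)
    (h0 : (pvInitA data).getD a (Sum.inl PySem.Set.empty) = Sum.inl s)
    (hB : pvCollect data a = pvCollectG PySem.Set.update a data s) :
    pvFmtA (a, (pvFinalA data).getD a (Sum.inl PySem.Set.empty))
    = pvFormat a (pvCollect data a) := by
  rw [pvFinalA, pvCondIns_getD_ne _ _ _ _ _ h3, pvCondIns_getD_ne _ _ _ _ _ h2,
    pvCondIns_getD_ne _ _ _ _ _ h1, pvD1, pvLoopA_getD data a s hc h0, hB, pvFmt_inl]

-- ===== VERDICT (by name: the statement is the Claim_ definition above) =====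
theorem dict_to_query_string_spec : Claim_equal_dict_to_query_string := by
  intro data _hdom hpre
  unfold Spec_dict_to_query_string
  rw [pvA_eq, pvB_eq,
    PySem.Dict.items_eq_map_keys (pvFinalA data)
      (by rw [pvFinalA_keys]; decide) (Sum.inl PySem.Set.empty),
    pvFinalA_keys, List.map_map]
  congr 1
  apply List.map_congr_left
  intro a ha
  simp only [Function.comp]
  have hmem := pvRescan_eq "member_id" data hpre
  have htab := pvRescan_eq "table_id" data hpre
  have hvar := pvRescan_eq "variable_id" data hpre
  simp only [pvAttrs, List.mem_cons, List.not_mem_nil, or_false] at ha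
  rcases ha with rfl | rfl | rfl | rfl | rfl | rfl | rfl | rfl
  -- the five ordinary attributes: both sides collect the same set from the same start
  case _ =>
    exact pvPlainCase data "activity_id" PySem.Set.empty (by decide) (by decide) (by decide)
      (pvInitA_contains data _ (by decide))
      ((pvInitA_getD_ne data _ (by decide)).trans (by decide))
      (pvCollect_eq_ne data _ (by decide) hpre)
  case _ =>
    exact pvPlainCase data "institution_id" PySem.Set.empty (by decide) (by decide) (by decide)
      (pvInitA_contains data _ (by decide))
      ((pvInitA_getD_ne data _ (by decide)).trans (by decide))
      (pvCollect_eq_ne data _ (by decide) hpre)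
  case _ =>
    exact pvPlainCase data "source_id" (PySem.Set.ofList (data.map Prod.fst))
      (by decide) (by decide) (by decide)
      (pvInitA_contains data _ (by decide))
      (pvInitA_getD_src data)
      (pvCollect_eq_src data hpre)
  case _ =>
    exact pvPlainCase data "experiment_id" PySem.Set.empty (by decide) (by decide) (by decide)
      (pvInitA_contains data _ (by decide))
      ((pvInitA_getD_ne data _ (by decide)).trans (by decide))
      (pvCollect_eq_ne data _ (by decide) hpre)
  case _ =>
    -- member_id: A may collapse a one-element set to a string; the output is identical
    rw [pvFinalA, pvCondIns_getD_ne _ "variable_id" "member_id" _ _ (by decide),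
      pvCondIns_getD_ne _ "table_id" "member_id" _ _ (by decide),
      pvCondIns_getD_self, hmem,
      pvCollect_eq_ne data "member_id" (by decide) hpre]
    split_ifs with hlen
    · exact pvFmt_collapse _ _ hlen
    · rw [pvD1,
        pvLoopA_getD data "member_id" PySem.Set.empty (pvInitA_contains data "member_id" (by decide))
          (pvInitA_getD_plain data "member_id" (by decide) (by decide)), pvFmt_inl]
  case _ =>
    -- table_id: A may collapse a one-element set to a string; the output is identical
    rw [pvFinalA, pvCondIns_getD_ne _ "variable_id" "table_id" _ _ (by decide),
      pvCondIns_getD_self, htab,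
      pvCollect_eq_ne data "table_id" (by decide) hpre]
    split_ifs with hlen
    · exact pvFmt_collapse _ _ hlen
    · rw [pvCondIns_getD_ne _ "member_id" "table_id" _ _ (by decide),
        pvD1,
        pvLoopA_getD data "table_id" PySem.Set.empty (pvInitA_contains data "table_id" (by decide))
          (pvInitA_getD_plain data "table_id" (by decide) (by decide)), pvFmt_inl]
  case _ =>
    -- variable_id: A may collapse a one-element set to a string; the output is identical
    rw [pvFinalA, pvCondIns_getD_self, hvar,
      pvCollect_eq_ne data "variable_id" (by decide) hpre]
    split_ifs with hlen
    · exact pvFmt_collapse _ _ hlen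
    · rw [pvCondIns_getD_ne _ "table_id" "variable_id" _ _ (by decide),
        pvCondIns_getD_ne _ "member_id" "variable_id" _ _ (by decide),
        pvD1,
        pvLoopA_getD data "variable_id" PySem.Set.empty (pvInitA_contains data "variable_id" (by decide))
          (pvInitA_getD_plain data "variable_id" (by decide) (by decide)), pvFmt_inl]
  case _ =>
    exact pvPlainCase data "grid_label" PySem.Set.empty (by decide) (by decide) (by decide)
      (pvInitA_contains data _ (by decide))
      ((pvInitA_getD_ne data _ (by decide)).trans (by decide))
      (pvCollect_eq_ne data _ (by decide) hpre)
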